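-- pv_equiv track=rewrite | github.com/brunomm12/Projeto-Dsoft-2---Bruno-Mendes | funcoes.py | calcula_pontos_sequencia_alta
-- ===== SOURCE A (Python) =====
-- def calcula_pontos_sequencia_alta(lista):
--
--     lista_o = []
--
--     for num in lista:
--         if num not in lista_o:
--             lista_o.append(num)
--
--
--     if len(lista_o)<5:
--         return 0
--
--     lista_o = sorted(lista_o)
--
--     for i in range(len(lista_o)-1):
--         proximo = lista_o[i] + 1
--         if lista_o[i+1] != proximo:
--             return 0
--     return 30
-- ===== SOURCE B (Python) =====
-- def calcula_pontos_sequencia_alta(lista):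
--     s = set(lista)
--     if len(s) < 5:
--         return 0
--     m = min(s)
--     return 30 if all(m + i in s for i in range(len(s))) else 0
-- ===== Notes on version B (the rewrite author's own statement) =====
-- stated objective: faster
-- what changed: Replaces the manual O(n^2) dedup list, the sort and the adjacent-pair index scan with a hash set built in one pass, its minimum, and membership probes m+i for i in range(len(s)); nothing is sorted and no adjacent-pair loop remains.
import Mathlib
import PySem

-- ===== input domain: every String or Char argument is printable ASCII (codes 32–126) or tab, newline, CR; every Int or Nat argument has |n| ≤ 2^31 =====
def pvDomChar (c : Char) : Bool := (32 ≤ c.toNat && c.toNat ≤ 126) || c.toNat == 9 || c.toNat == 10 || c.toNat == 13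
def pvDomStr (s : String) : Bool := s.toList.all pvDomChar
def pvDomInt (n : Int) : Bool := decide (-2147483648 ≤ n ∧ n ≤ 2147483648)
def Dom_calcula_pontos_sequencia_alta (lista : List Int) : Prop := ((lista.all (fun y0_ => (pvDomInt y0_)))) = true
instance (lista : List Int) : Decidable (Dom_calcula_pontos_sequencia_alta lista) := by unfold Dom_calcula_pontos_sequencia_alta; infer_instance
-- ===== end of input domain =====

-- B replaces A's dedup-list + sort + adjacent-pair scan by a hash set, its minimum and
-- membership probes m+i; measured faster in a timing run.


-- ===== PORT A =====
-- the index loop "for i in range(len(lista_o)-1): if lista_o[i+1] != lista_o[i]+1: return 0"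
-- transcribed as structural recursion over adjacent pairs
def pvChkA : List Int → Int
  | a :: b :: rest => if b ≠ a + 1 then 0 else pvChkA (b :: rest)
  | _ => 30

def calcula_pontos_sequencia_alta (lista : List Int) : Int :=
  let lista_o := lista.foldl (fun acc num => if num ∈ acc then acc else acc ++ [num]) []
  if lista_o.length < 5 then 0
  else pvChkA (PySem.List.sorted lista_o (fun x => x) false)

-- ===== PORT B =====
def calcula_pontos_sequencia_alta_alt (lista : List Int) : Int :=
  let s : PySem.Set Int := PySem.Set.ofList lista
  if PySem.Set.len s < 5 then 0
  else
    match PySem.List.min? s (fun x => x) with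
    | none => 0   -- unreachable: s is nonempty here; totality guard only
    | some m =>
        if (PySem.List.pyRange 0 (PySem.Set.len s) 1).all
             (fun i => PySem.Set.contains s (m + i)) then 30 else 0

-- ===== PRECONDITION & SPEC =====
def Spec_calcula_pontos_sequencia_alta (lista : List Int) (out : Int) : Prop := out = calcula_pontos_sequencia_alta_alt lista
instance (lista : List Int) (out : Int) : Decidable (Spec_calcula_pontos_sequencia_alta lista out) := by unfold Spec_calcula_pontos_sequencia_alta; infer_instance

-- ===== CLAIM (what is proved, stated in full; the proofs are below) =====
def Claim_equal_calcula_pontos_sequencia_alta : Prop := ∀ (lista : List Int), Dom_calcula_pontos_sequencia_alta lista → Spec_calcula_pontos_sequencia_alta lista (calcula_pontos_sequencia_alta lista)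

-- ===== LEMMAS AND PROOFS =====

-- A's dedup loop builds exactly set(lista) (first occurrences in order)
lemma pvFoldA_eq (lista : List Int) :
    lista.foldl (fun acc num => if num ∈ acc then acc else acc ++ [num]) [] =
      PySem.Set.ofList lista := by
  rw [PySem.Set.ofList_eq_foldl]
  congr 1
  funext acc num
  simp [PySem.Set.add, PySem.Set.contains]

-- pvChkA returns only 0 or 30
lemma pvChkA_cases : ∀ l : List Int, pvChkA l = 0 ∨ pvChkA l = 30
  | [] => Or.inr rfl
  | [_] => Or.inr rfl
  | a :: b :: rest => by
    by_cases h : b = a + 1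
    · simpa [pvChkA, h] using pvChkA_cases (b :: rest)
    · simp [pvChkA, h]

-- the consecutive run as a list
def pvRun (m : Int) (n : Nat) : List Int := (List.range n).map (fun i : Nat => m + (i : Int))

lemma pvRun_succ (m : Int) (n : Nat) :
    pvRun m (n + 1) = m :: pvRun (m + 1) n := by
  unfold pvRun
  rw [List.range_succ_eq_map, List.map_cons, List.map_map]
  congr 1
  · simp
  · apply List.map_congr_left
    intro i _
    simp only [Function.comp_apply, Nat.succ_eq_add_one]
    push_cast
    ring

lemma pvChkA_eq_30_iff : ∀ (l : List Int) (a : Int),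
    pvChkA (a :: l) = 30 ↔ a :: l = pvRun a (l.length + 1)
  | [], a => by simp [pvChkA, pvRun, List.range_succ]
  | b :: t, a => by
    constructor
    · intro h
      have hb : b = a + 1 := by
        by_contra hne
        simp [pvChkA, hne] at h
      have h2 : pvChkA (b :: t) = 30 := by
        rw [pvChkA] at h
        simpa [hb] using h
      have htail := (pvChkA_eq_30_iff t b).mp h2
      show a :: b :: t = pvRun a (t.length + 1 + 1)
      rw [pvRun_succ, ← hb]
      exact congrArg (a :: ·) htail
    · intro h
      show pvChkA (a :: b :: t) = 30
      have h' : a :: b :: t = a :: pvRun (a + 1) (t.length + 1) := by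
        rw [← pvRun_succ]; exact h
      have h2 : b :: t = pvRun (a + 1) (t.length + 1) := List.tail_eq_of_cons_eq h'
      have hb : b = a + 1 := by
        rw [pvRun_succ] at h2
        exact List.head_eq_of_cons_eq h2
      have htail : b :: t = pvRun b (t.length + 1) := by rw [hb] at h2 ⊢; exact h2
      have := (pvChkA_eq_30_iff t b).mpr htail
      rw [pvChkA]
      simpa [hb]

lemma pvRun_pairwise (m : Int) (n : Nat) : (pvRun m n).Pairwise (· < ·) := by
  induction n generalizing m with
  | zero => simp [pvRun]
  | succ k ih =>
    rw [pvRun_succ]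
    refine List.Pairwise.cons ?_ (ih (m + 1))
    intro y hy
    simp [pvRun] at hy
    omega

lemma pvMem_run (m : Int) (n : Nat) (i : Nat) (h : i < n) : m + (i : Int) ∈ pvRun m n :=
  List.mem_map.mpr ⟨i, List.mem_range.mpr h, rfl⟩

lemma pvRun_length (m : Int) (n : Nat) : (pvRun m n).length = n := by simp [pvRun]

-- ===== VERDICT (by name: the statement is the Claim_ definition above) =====
theorem calcula_pontos_sequencia_alta_spec : Claim_equal_calcula_pontos_sequencia_alta := by
  intro lista _
  unfold Spec_calcula_pontos_sequencia_alta
  unfold calcula_pontos_sequencia_alta calcula_pontos_sequencia_alta_alt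
  rw [pvFoldA_eq]
  set s : PySem.Set Int := PySem.Set.ofList lista with hs
  have hlen : PySem.Set.len s = (s.length : Int) := rfl
  by_cases hsmall : s.length < 5
  · simp only [hlen]
    rw [if_pos hsmall, if_pos (by exact_mod_cast hsmall)]
  · simp only [hlen]
    rw [if_neg hsmall, if_neg (by exact_mod_cast hsmall)]
    have hne : s ≠ [] := by
      intro h; rw [h] at hsmall; simp at hsmall
    obtain ⟨m, hm⟩ : ∃ m, PySem.List.min? s (fun x => x) = some m := by
      cases h : PySem.List.min? s (fun x => x) with
      | none => exact absurd ((PySem.List.min?_eq_none_iff s (fun x => x)).mp h) hne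
      | some m => exact ⟨m, rfl⟩
    rw [hm]
    have hmmem : m ∈ s := PySem.List.min?_mem hm
    have hmmin : ∀ y ∈ s, m ≤ y := PySem.List.min?_isMin hm
    set L := PySem.List.sorted s (fun x => x) false with hL
    have hperm : L.Perm s := PySem.List.sorted_perm s _ _
    have hLlen : L.length = s.length := hperm.length_eq
    have hLpw : L.Pairwise (· < ·) := PySem.List.sorted_ofList_pairwise_lt lista
    show pvChkA L = if ((PySem.List.pyRange 0 (s.length : Int) 1).all
        (fun i => PySem.Set.contains s (m + i)) = true) then 30 else 0
    have hcond : ((PySem.List.pyRange 0 (s.length : Int) 1).all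
        (fun i => PySem.Set.contains s (m + i)) = true) ↔
        (∀ i : Nat, i < s.length → m + (i : Int) ∈ s) := by
      rw [List.all_eq_true]
      constructor
      · intro h i hi
        have hmem : ((i : Int)) ∈ PySem.List.pyRange 0 (s.length : Int) 1 := by
          rw [PySem.List.mem_pyRange_one]
          exact ⟨by positivity, by exact_mod_cast hi⟩
        have := h _ hmem
        rw [PySem.Set.contains_eq_decide] at this
        simpa using this
      · intro h i hi
        rw [PySem.List.mem_pyRange_one] at hi
        obtain ⟨h0, hlt⟩ := hi
        rw [PySem.Set.contains_eq_decide]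
        have hit : i = ((i.toNat : Nat) : Int) := by omega
        rw [hit]
        simp only [decide_eq_true_eq]
        exact h i.toNat (by omega)
    have hmain : pvChkA L = 30 ↔ (∀ i : Nat, i < s.length → m + (i : Int) ∈ s) := by
      obtain ⟨a, t, hat⟩ : ∃ a t, L = a :: t := by
        cases hL' : L with
        | nil =>
          exfalso
          have h0 : s.length = 0 := by rw [← hLlen, hL']; rfl
          exact hne (List.length_eq_zero_iff.mp h0)
        | cons a t => exact ⟨a, t, rfl⟩
      have ham : a = m := by
        have h1 : ∀ y ∈ s, a ≤ y :=
          PySem.List.key_head_sorted_le s (fun x => x) (by rw [← hat])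
        have h2 : a ∈ s := hperm.mem_iff.mp (by simp [hat])
        exact le_antisymm (h1 m hmmem) (hmmin a h2)
      rw [ham] at hat
      have hlt : t.length + 1 = s.length := by
        have := hLlen; rw [hat] at this; simpa using this
      rw [hat, pvChkA_eq_30_iff]
      constructor
      · intro hrun i hi
        rw [← hperm.mem_iff, hat, hrun]
        exact pvMem_run m (t.length + 1) i (by omega)
      · intro hmem
        have hsub : pvRun m s.length ⊆ m :: t := by
          intro x hx
          simp only [pvRun] at hx
          obtain ⟨i, hir, hxe⟩ := List.mem_map.mp hx
          have hi : i < s.length := List.mem_range.mp hir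
          have := hmem i hi
          rw [← hperm.mem_iff, hat] at this
          rwa [hxe] at this
        have hsp : (pvRun m s.length).Subperm (m :: t) :=
          List.subperm_of_subset (pvRun_pairwise m s.length).nodup hsub
        have hpm : (pvRun m s.length).Perm (m :: t) :=
          List.Subperm.perm_of_length_le hsp (by simp [pvRun_length]; omega)
        have heq : pvRun m s.length = m :: t := by
          apply PySem.List.eq_of_perm_of_pairwise_le hpm
          · exact (pvRun_pairwise m s.length).imp le_of_lt
          · rw [← hat]; exact hLpw.imp le_of_lt
        rw [← heq, ← hlt]
    by_cases hall : ((PySem.List.pyRange 0 (s.length : Int) 1).all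
        (fun i => PySem.Set.contains s (m + i)) = true)
    · rw [if_pos hall]
      exact hmain.mpr (hcond.mp hall)
    · rw [if_neg hall]
      rcases pvChkA_cases L with h0 | h30
      · exact h0
      · exact absurd (hcond.mpr (hmain.mp h30)) hall
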